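-- pv_equiv track=rewrite | github.com/vasp-dev/py4vasp | src/py4vasp/data/_dispersion.py | _filter_unique
-- ===== SOURCE A (Python) =====
-- def _filter_unique(ticks, labels):
--     result = {}
--     for tick, label in zip(ticks, labels):
--         if tick in result:
--             previous_label = result[tick]
--             if previous_label != "" and previous_label != label:
--                 label = previous_label + "|" + label
--         result[tick] = label
--     return result
-- ===== SOURCE B (Python) =====
-- def _filter_unique(ticks, labels):
--     groups = {}
--     for tick, label in zip(ticks, labels):
--         groups.setdefault(tick, []).append(label)
--     result = {}
--     for tick, labs in groups.items():
--         acc = labs[0]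
--         for label in labs[1:]:
--             if acc != "" and acc != label:
--                 label = acc + "|" + label
--             acc = label
--         result[tick] = acc
--     return result
-- ===== Notes on version B (the rewrite author's own statement) =====
-- stated objective: alternative
-- what changed: Replaces the single interleaved dict-update scan with two passes: first group labels per tick into an ordered index with setdefault/append, then reduce each tick's label list separately with an accumulator.
import Mathlib
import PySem

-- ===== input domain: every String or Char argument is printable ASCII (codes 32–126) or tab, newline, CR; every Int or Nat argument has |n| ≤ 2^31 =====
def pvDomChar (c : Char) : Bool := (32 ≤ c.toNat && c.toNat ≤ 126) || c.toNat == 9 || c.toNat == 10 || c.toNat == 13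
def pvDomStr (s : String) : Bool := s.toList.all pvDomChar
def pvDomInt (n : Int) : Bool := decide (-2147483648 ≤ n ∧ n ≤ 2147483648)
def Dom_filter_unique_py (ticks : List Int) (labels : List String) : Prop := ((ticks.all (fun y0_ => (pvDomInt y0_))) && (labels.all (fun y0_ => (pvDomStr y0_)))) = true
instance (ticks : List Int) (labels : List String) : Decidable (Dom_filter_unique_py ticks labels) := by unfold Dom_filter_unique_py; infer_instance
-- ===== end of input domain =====

-- B replaces A's single interleaved dict-update scan by a group-then-reduce two-pass (same cost, different decomposition); proved to return the same dict.


-- ===== PORT A =====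
def filter_unique_py (ticks : List Int) (labels : List String) : List (Int × String) :=
  let result : PySem.Dict Int String :=
    (List.zip ticks labels).foldl (fun result tl =>
      let tick := tl.1
      let label := tl.2
      let label :=
        if result.contains tick then
          let previous_label := result.getD tick ""   -- result[tick]: key is present, so getD is exact
          if previous_label ≠ "" ∧ previous_label ≠ label then previous_label ++ "|" ++ label
          else label
        else label
      result.insert tick label) PySem.Dict.empty
  result.items

-- ===== PORT B =====
-- labs[0]/labs[1:] reduction of Source B; [] is unreachable (group values are nonempty), "" is a dummy there
def pvReduceLabs (labs : List String) : String :=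
  match labs with
  | [] => ""
  | acc :: rest =>
      rest.foldl (fun acc label =>
        if acc ≠ "" ∧ acc ≠ label then acc ++ "|" ++ label else label) acc

def filter_unique_py_alt (ticks : List Int) (labels : List String) : List (Int × String) :=
  let groups : PySem.Dict Int (List String) :=
    (List.zip ticks labels).foldl (fun groups tl =>
      groups.modify tl.1 [] (· ++ [tl.2])) PySem.Dict.empty   -- setdefault(t, []).append(l)
  let result : PySem.Dict Int String :=
    groups.items.foldl (fun result p => result.insert p.1 (pvReduceLabs p.2)) PySem.Dict.empty
  result.items

-- ===== PRECONDITION & SPEC =====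
def Spec_filter_unique_py (ticks : List Int) (labels : List String) (out : List (Int × String)) : Prop := out = filter_unique_py_alt ticks labels
instance (ticks : List Int) (labels : List String) (out : List (Int × String)) : Decidable (Spec_filter_unique_py ticks labels out) := by unfold Spec_filter_unique_py; infer_instance

-- ===== CLAIM (what is proved, stated in full; the proofs are below) =====
def Claim_equal_filter_unique_py : Prop := ∀ (ticks : List Int) (labels : List String), Dom_filter_unique_py ticks labels → Spec_filter_unique_py ticks labels (filter_unique_py ticks labels)

-- ===== LEMMAS AND PROOFS =====

-- the pair transform that turns a group entry into A's dict entry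
def pvF (p : Int × List String) : Int × String := (p.1, pvReduceLabs p.2)

-- B's inner modify written as an insert (definitional)
theorem pv_modify_append (g : PySem.Dict Int (List String)) (t : Int) (l : String) :
    g.modify t [] (· ++ [l]) = g.insert t (g.getD t [] ++ [l]) := rfl

theorem pvReduce_append (ls : List String) (l : String) (h : ls ≠ []) :
    pvReduceLabs (ls ++ [l]) =
      (if pvReduceLabs ls ≠ "" ∧ pvReduceLabs ls ≠ l then pvReduceLabs ls ++ "|" ++ l else l) := by
  match ls with
  | [] => exact absurd rfl h
  | a :: rest => simp [pvReduceLabs, List.foldl_append]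

-- A's loop step and B's loop step
def pvStepA (d : PySem.Dict Int String) (tl : Int × String) : PySem.Dict Int String :=
  let tick := tl.1
  let label := tl.2
  let label :=
    if d.contains tick then
      let previous_label := d.getD tick ""
      if previous_label ≠ "" ∧ previous_label ≠ label then previous_label ++ "|" ++ label
      else label
    else label
  d.insert tick label

def pvStepB (g : PySem.Dict Int (List String)) (tl : Int × String) : PySem.Dict Int (List String) :=
  g.modify tl.1 [] (· ++ [tl.2])

-- keys coincide under the invariant
theorem pv_keys_eq (d : PySem.Dict Int String) (g : PySem.Dict Int (List String))
    (h : d.items = g.items.map pvF) : d.keys = g.keys := by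
  simp only [PySem.Dict.keys, h, List.map_map]
  rfl

-- the loop invariant is preserved by one step
theorem pv_step_inv (d : PySem.Dict Int String) (g : PySem.Dict Int (List String)) (tl : Int × String)
    (h1 : d.items = g.items.map pvF) (h2 : g.keys.Nodup) (h3 : ∀ p ∈ g.items, p.2 ≠ []) :
    (pvStepA d tl).items = (pvStepB g tl).items.map pvF ∧ (pvStepB g tl).keys.Nodup ∧
      (∀ p ∈ (pvStepB g tl).items, p.2 ≠ []) := by
  obtain ⟨t, l⟩ := tl
  have hkeys := pv_keys_eq d g h1
  have hdk : d.keys.Nodup := hkeys ▸ h2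
  have hcont : d.contains t = g.contains t := by
    rw [PySem.Dict.contains_eq_decide_mem_keys, PySem.Dict.contains_eq_decide_mem_keys, hkeys]
  by_cases hc : g.contains t = true
  · -- key present
    have hdc : d.contains t = true := by rw [hcont]; exact hc
    have hmem : t ∈ g.keys := (PySem.Dict.contains_iff_mem_keys g t).mp hc
    obtain ⟨p, hp, hpt⟩ : ∃ p ∈ g.items, p.1 = t := by
      simpa [PySem.Dict.keys] using hmem
    obtain ⟨t', ls⟩ := p
    dsimp only at hpt
    subst hpt
    have hgD : g.getD t' [] = ls := PySem.Dict.getD_of_mem_items g hp h2 []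
    have hdD : d.getD t' "" = pvReduceLabs ls := by
      have hm : (t', pvReduceLabs ls) ∈ d.items := by
        rw [h1]; exact List.mem_map_of_mem hp
      exact PySem.Dict.getD_of_mem_items d hm hdk ""
    have hls : ls ≠ [] := h3 _ hp
    have hB : pvStepB g (t', l) = g.insert t' (ls ++ [l]) := by
      rw [pvStepB, pv_modify_append, hgD]
    refine ⟨?_, ?_, ?_⟩
    · rw [pvStepA, hB]
      simp only [hdc, if_true, hdD]
      rw [PySem.Dict.items_insert_of_contains d _ hdc,
          PySem.Dict.items_insert_of_contains g _ hc,
          h1, List.map_map, List.map_map]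
      apply List.map_congr_left
      intro q hq
      obtain ⟨tq, lsq⟩ := q
      by_cases hqt : tq = t'
      · subst hqt
        have hlq : lsq = ls := by
          have h' := PySem.Dict.getD_of_mem_items g hq h2 []
          rw [hgD] at h'; exact h'.symm
        subst hlq
        simp [pvF, Function.comp, pvReduce_append lsq l hls]
      · simp [pvF, Function.comp, hqt]
    · rw [hB, PySem.Dict.keys_insert_of_contains g _ hc]; exact h2
    · intro q hq
      rw [hB, PySem.Dict.items_insert_of_contains g _ hc] at hq
      obtain ⟨q', hq', rfl⟩ := List.mem_map.mp hq
      by_cases hq't : (q'.1 == t') = true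
      · simp [hq't]
      · simpa [hq't] using h3 _ hq'
  · -- fresh key
    have hcf : g.contains t = false := by simpa using hc
    have hdcf : d.contains t = false := by rw [hcont]; exact hcf
    have hB : pvStepB g (t, l) = g.insert t [l] := by
      rw [pvStepB, pv_modify_append, PySem.Dict.getD_of_not_contains g [] hcf]; rfl
    refine ⟨?_, ?_, ?_⟩
    · rw [pvStepA, hB]
      simp only [hdcf, Bool.false_eq_true, if_false]
      rw [PySem.Dict.items_insert_of_not_contains d _ hdcf,
          PySem.Dict.items_insert_of_not_contains g _ hcf, h1, List.map_append]
      rfl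
    · rw [hB, PySem.Dict.keys_insert_of_not_contains g _ hcf]
      refine List.nodup_append.mpr ⟨h2, List.nodup_singleton t, ?_⟩
      intro x hx y hy
      rw [List.mem_singleton] at hy
      subst hy
      intro hxt
      subst hxt
      exact absurd ((PySem.Dict.contains_iff_mem_keys g x).mpr hx) (by simp [hcf])
    · intro q hq
      rw [hB, PySem.Dict.items_insert_of_not_contains g _ hcf] at hq
      rcases List.mem_append.mp hq with h' | h'
      · exact h3 _ h'
      · simp only [List.mem_singleton] at h'; subst h'; simp

theorem pv_loop_inv (zs : List (Int × String)) (d : PySem.Dict Int String)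
    (g : PySem.Dict Int (List String))
    (h1 : d.items = g.items.map pvF) (h2 : g.keys.Nodup) (h3 : ∀ p ∈ g.items, p.2 ≠ []) :
    (zs.foldl pvStepA d).items = (zs.foldl pvStepB g).items.map pvF ∧
      (zs.foldl pvStepB g).keys.Nodup ∧ (∀ p ∈ (zs.foldl pvStepB g).items, p.2 ≠ []) := by
  induction zs generalizing d g with
  | nil => exact ⟨h1, h2, h3⟩
  | cons tl rest ih =>
    obtain ⟨j1, j2, j3⟩ := pv_step_inv d g tl h1 h2 h3
    exact ih _ _ j1 j2 j3

-- ===== VERDICT (by name: the statement is the Claim_ definition above) =====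
theorem filter_unique_py_spec : Claim_equal_filter_unique_py := by
  intro ticks labels _
  unfold Spec_filter_unique_py filter_unique_py filter_unique_py_alt
  have h0 : (PySem.Dict.empty : PySem.Dict Int String).items =
      ((PySem.Dict.empty : PySem.Dict Int (List String)).items).map pvF := rfl
  obtain ⟨h1, h2, _⟩ := pv_loop_inv (List.zip ticks labels) PySem.Dict.empty PySem.Dict.empty h0
    (by simp [PySem.Dict.keys_empty])
    (by intro p hp
        simp only [show (PySem.Dict.empty : PySem.Dict Int (List String)).items = [] from rfl] at hp
        exact absurd hp (by simp))
  have hfresh := PySem.Dict.items_foldl_insert_fresh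
    (l := ((List.zip ticks labels).foldl pvStepB PySem.Dict.empty).items)
    (k := fun p => p.1) (v := fun p => pvReduceLabs p.2)
    (d := (PySem.Dict.empty : PySem.Dict Int String))
    (fun a _ => PySem.Dict.contains_empty _)
    (by simpa [PySem.Dict.keys] using h2)
  exact h1.trans hfresh.symm
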